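-- pv_equiv track=rewrite | github.com/epistemologist/ChessAI | game.py | chess_path
-- ===== SOURCE A (Python) =====
-- def chess_path(pos1, pos2):
-- 	path = [pos2]
-- 	if pos1[1] > pos2[1]:
-- 		pos1, pos2 = pos2, pos1
-- 	x1, y1 = pos1
-- 	x2, y2 = pos2
-- 	if x1 == x2:
-- 		path.extend([(x1, i) for i in range(min(y1, y2), max(y1, y2)+1)])
-- 	if y1 == y2:
-- 		path.extend([(i, y1) for i in range(min(x1, x2), max(x1, x2)+1)])
-- 	if (y2 - y1) == (x2 - x1):
-- 		path.extend([(x1+i, y1+i) for i in range(y2-y1+1)])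
-- 	if (x2 - x1) == -(y2 - y1):
-- 		path.extend([(x1-i, y1+i) for i in range(y2-y1+1)])
-- 	return sorted(list(set(path)))
-- ===== SOURCE B (Python) =====
-- def chess_path(pos1, pos2):
--     x1, y1 = pos1
--     x2, y2 = pos2
--     dx = x2 - x1
--     dy = y2 - y1
--     if dx == 0 or dy == 0 or abs(dx) == abs(dy):
--         n = max(abs(dx), abs(dy))
--         sx = (dx > 0) - (dx < 0)
--         sy = (dy > 0) - (dy < 0)
--         pts = {(x1 + k * sx, y1 + k * sy) for k in range(n + 1)}
--     else:
--         pts = {pos2}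
--     return sorted(pts)
-- ===== Notes on version B (the rewrite author's own statement) =====
-- stated objective: simpler
-- what changed: Replaces A's y-swap plus four per-direction range comprehensions (appended onto a seed list and deduplicated) with a single unit-vector stepping comprehension from pos1 toward pos2 when the squares are aligned, else just {pos2}.
import Mathlib
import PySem

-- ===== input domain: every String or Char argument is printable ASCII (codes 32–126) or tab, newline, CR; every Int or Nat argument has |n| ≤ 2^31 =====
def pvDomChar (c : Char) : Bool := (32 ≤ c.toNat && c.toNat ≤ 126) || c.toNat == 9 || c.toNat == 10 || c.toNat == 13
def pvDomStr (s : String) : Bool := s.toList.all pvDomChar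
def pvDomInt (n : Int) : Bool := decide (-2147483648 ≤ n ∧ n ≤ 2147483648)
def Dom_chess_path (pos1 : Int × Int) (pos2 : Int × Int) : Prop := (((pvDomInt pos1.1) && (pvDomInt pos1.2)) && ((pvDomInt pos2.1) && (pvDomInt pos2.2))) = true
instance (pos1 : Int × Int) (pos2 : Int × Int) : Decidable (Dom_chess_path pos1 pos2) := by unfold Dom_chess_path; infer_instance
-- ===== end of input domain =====

-- B replaces A's y-swap plus four per-direction range comprehensions with one
-- unit-vector stepping comprehension (simpler decomposition; same return value).


-- ===== PORT A =====
-- the list 'path' after the four conditional 'extend's (x1 y1 x2 y2 are the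
-- coordinates AFTER the swap that ensures y1 ≤ y2; pos2orig is the unswapped pos2)
def chessPathList (pos2orig : Int × Int) (x1 y1 x2 y2 : Int) : List (Int × Int) :=
  let path := [pos2orig]
  let path := if x1 = x2 then path ++ (PySem.List.pyRange (min y1 y2) (max y1 y2 + 1) 1).map (fun i => (x1, i)) else path
  let path := if y1 = y2 then path ++ (PySem.List.pyRange (min x1 x2) (max x1 x2 + 1) 1).map (fun i => (i, y1)) else path
  let path := if y2 - y1 = x2 - x1 then path ++ (PySem.List.pyRange 0 (y2 - y1 + 1) 1).map (fun i => (x1 + i, y1 + i)) else path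
  let path := if x2 - x1 = -(y2 - y1) then path ++ (PySem.List.pyRange 0 (y2 - y1 + 1) 1).map (fun i => (x1 - i, y1 + i)) else path
  path

def chess_path (pos1 : Int × Int) (pos2 : Int × Int) : List (Int × Int) :=
  let p := if pos1.2 > pos2.2 then (pos2, pos1) else (pos1, pos2)
  PySem.List.sorted2 (PySem.Set.ofList (chessPathList pos2 p.1.1 p.1.2 p.2.1 p.2.2)) Prod.fst Prod.snd

-- ===== PORT B =====
def chess_path_alt (pos1 : Int × Int) (pos2 : Int × Int) : List (Int × Int) :=
  let x1 := pos1.1; let y1 := pos1.2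
  let dx := pos2.1 - pos1.1
  let dy := pos2.2 - pos1.2
  let pts :=
    if dx = 0 ∨ dy = 0 ∨ dx.natAbs = dy.natAbs then
      let n : Int := max |dx| |dy|
      let sx : Int := (if dx > 0 then 1 else 0) - (if dx < 0 then 1 else 0)
      let sy : Int := (if dy > 0 then 1 else 0) - (if dy < 0 then 1 else 0)
      PySem.Set.ofList ((PySem.List.pyRange 0 (n + 1) 1).map (fun k => (x1 + k * sx, y1 + k * sy)))
    else
      PySem.Set.ofList [pos2]
  PySem.List.sorted2 pts Prod.fst Prod.snd

-- ===== PRECONDITION & SPEC =====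
def Spec_chess_path (pos1 : Int × Int) (pos2 : Int × Int) (out : List (Int × Int)) : Prop := out = chess_path_alt pos1 pos2
instance (pos1 : Int × Int) (pos2 : Int × Int) (out : List (Int × Int)) : Decidable (Spec_chess_path pos1 pos2 out) := by unfold Spec_chess_path; infer_instance

-- ===== CLAIM (what is proved, stated in full; the proofs are below) =====
def Claim_equal_chess_path : Prop := ∀ (pos1 : Int × Int) (pos2 : Int × Int), Dom_chess_path pos1 pos2 → Spec_chess_path pos1 pos2 (chess_path pos1 pos2)

-- ===== LEMMAS AND PROOFS =====

-- sorted(list-of-pairs) with fst/snd keys is sorting by the lexicographic key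
theorem sorted2_eq_sorted_lex (xs : List (Int × Int)) :
    PySem.List.sorted2 xs Prod.fst Prod.snd = PySem.List.sorted xs (fun p => toLex p) false := by
  unfold PySem.List.sorted2 PySem.List.sorted
  have hb : (fun (a b : Int × Int) => decide (a.1 < b.1) || (!decide (b.1 < a.1) && decide (a.2 < b.2)))
      = (fun (a b : Int × Int) => decide (toLex a < toLex b)) := by
    funext a b
    by_cases h1 : a.1 < b.1 <;> by_cases h2 : b.1 < a.1 <;> by_cases h3 : a.2 < b.2 <;>
      simp [h1, h2, h3, Prod.Lex.lt_iff] <;> omega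
  simp [hb]

theorem sorted2_eq_of_perm (xs ys : List (Int × Int)) (h : xs.Perm ys) :
    PySem.List.sorted2 xs Prod.fst Prod.snd = PySem.List.sorted2 ys Prod.fst Prod.snd := by
  rw [sorted2_eq_sorted_lex, sorted2_eq_sorted_lex]
  exact PySem.List.sorted_eq_sorted_of_perm xs ys _ (fun a b hab => by simpa using hab) h

-- membership characterizations of the straight-line comprehensions
theorem mem_col (px py c a b : Int) :
    ((px, py) ∈ (PySem.List.pyRange a b 1).map (fun i => (c, i))) ↔ px = c ∧ a ≤ py ∧ py < b := by
  simp only [List.mem_map, PySem.List.mem_pyRange_one, Prod.mk.injEq]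
  constructor
  · rintro ⟨i, hi, h1, h2⟩; omega
  · rintro ⟨h1, h2, h3⟩; exact ⟨py, ⟨h2, h3⟩, h1.symm, rfl⟩

theorem mem_row (px py c a b : Int) :
    ((px, py) ∈ (PySem.List.pyRange a b 1).map (fun i => (i, c))) ↔ py = c ∧ a ≤ px ∧ px < b := by
  simp only [List.mem_map, PySem.List.mem_pyRange_one, Prod.mk.injEq]
  constructor
  · rintro ⟨i, hi, h1, h2⟩; omega
  · rintro ⟨h1, h2, h3⟩; exact ⟨px, ⟨h2, h3⟩, rfl, h1.symm⟩

theorem mem_seg_pp (px py x0 y0 b : Int) :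
    ((px, py) ∈ (PySem.List.pyRange 0 b 1).map (fun k => (x0 + k, y0 + k))) ↔
      0 ≤ px - x0 ∧ px - x0 < b ∧ py - y0 = px - x0 := by
  simp only [List.mem_map, PySem.List.mem_pyRange_one, Prod.mk.injEq]
  constructor
  · rintro ⟨i, hi, h1, h2⟩; omega
  · rintro ⟨h1, h2, h3⟩; exact ⟨px - x0, ⟨h1, h2⟩, by omega, by omega⟩

theorem mem_seg_mp (px py x0 y0 b : Int) :
    ((px, py) ∈ (PySem.List.pyRange 0 b 1).map (fun k => (x0 - k, y0 + k))) ↔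
      0 ≤ py - y0 ∧ py - y0 < b ∧ px - x0 = -(py - y0) := by
  simp only [List.mem_map, PySem.List.mem_pyRange_one, Prod.mk.injEq]
  constructor
  · rintro ⟨i, hi, h1, h2⟩; omega
  · rintro ⟨h1, h2, h3⟩; exact ⟨py - y0, ⟨h1, h2⟩, by omega, by omega⟩

theorem mem_seg_pm (px py x0 y0 b : Int) :
    ((px, py) ∈ (PySem.List.pyRange 0 b 1).map (fun k => (x0 + k, y0 - k))) ↔
      0 ≤ px - x0 ∧ px - x0 < b ∧ py - y0 = -(px - x0) := by
  simp only [List.mem_map, PySem.List.mem_pyRange_one, Prod.mk.injEq]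
  constructor
  · rintro ⟨i, hi, h1, h2⟩; omega
  · rintro ⟨h1, h2, h3⟩; exact ⟨px - x0, ⟨h1, h2⟩, by omega, by omega⟩

theorem mem_seg_mm (px py x0 y0 b : Int) :
    ((px, py) ∈ (PySem.List.pyRange 0 b 1).map (fun k => (x0 - k, y0 - k))) ↔
      0 ≤ x0 - px ∧ x0 - px < b ∧ py - y0 = px - x0 := by
  simp only [List.mem_map, PySem.List.mem_pyRange_one, Prod.mk.injEq]
  constructor
  · rintro ⟨i, hi, h1, h2⟩; omega
  · rintro ⟨h1, h2, h3⟩; exact ⟨x0 - px, ⟨h1, h2⟩, by omega, by omega⟩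

theorem mem_vert_p (px py x0 y0 b : Int) :
    ((px, py) ∈ (PySem.List.pyRange 0 b 1).map (fun k => (x0, y0 + k))) ↔
      px = x0 ∧ 0 ≤ py - y0 ∧ py - y0 < b := by
  simp only [List.mem_map, PySem.List.mem_pyRange_one, Prod.mk.injEq]
  constructor
  · rintro ⟨i, hi, h1, h2⟩; omega
  · rintro ⟨h1, h2, h3⟩; exact ⟨py - y0, ⟨h2, h3⟩, h1.symm, by omega⟩

theorem mem_vert_m (px py x0 y0 b : Int) :
    ((px, py) ∈ (PySem.List.pyRange 0 b 1).map (fun k => (x0, y0 - k))) ↔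
      px = x0 ∧ 0 ≤ y0 - py ∧ y0 - py < b := by
  simp only [List.mem_map, PySem.List.mem_pyRange_one, Prod.mk.injEq]
  constructor
  · rintro ⟨i, hi, h1, h2⟩; omega
  · rintro ⟨h1, h2, h3⟩; exact ⟨y0 - py, ⟨h2, h3⟩, h1.symm, by omega⟩

theorem mem_horiz_p (px py x0 y0 b : Int) :
    ((px, py) ∈ (PySem.List.pyRange 0 b 1).map (fun k => (x0 + k, y0))) ↔
      py = y0 ∧ 0 ≤ px - x0 ∧ px - x0 < b := by
  simp only [List.mem_map, PySem.List.mem_pyRange_one, Prod.mk.injEq]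
  constructor
  · rintro ⟨i, hi, h1, h2⟩; omega
  · rintro ⟨h1, h2, h3⟩; exact ⟨px - x0, ⟨h2, h3⟩, by omega, h1.symm⟩

theorem mem_horiz_m (px py x0 y0 b : Int) :
    ((px, py) ∈ (PySem.List.pyRange 0 b 1).map (fun k => (x0 - k, y0))) ↔
      py = y0 ∧ 0 ≤ x0 - px ∧ x0 - px < b := by
  simp only [List.mem_map, PySem.List.mem_pyRange_one, Prod.mk.injEq]
  constructor
  · rintro ⟨i, hi, h1, h2⟩; omega
  · rintro ⟨h1, h2, h3⟩; exact ⟨x0 - px, ⟨h2, h3⟩, by omega, h1.symm⟩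

theorem mem_const (px py x0 y0 b : Int) :
    ((px, py) ∈ (PySem.List.pyRange 0 b 1).map (fun _ => (x0, y0))) ↔
      0 < b ∧ px = x0 ∧ py = y0 := by
  simp only [List.mem_map, PySem.List.mem_pyRange_one, Prod.mk.injEq]
  constructor
  · rintro ⟨i, hi, h1, h2⟩; omega
  · rintro ⟨h1, h2, h3⟩; exact ⟨0, by omega, h2.symm, h3.symm⟩


-- the two point lists contain exactly the same squares
theorem mem_lists (x1 y1 x2 y2 px py : Int) :
    ((px, py) ∈ chessPathList (x2, y2) (if y1 > y2 then x2 else x1) (if y1 > y2 then y2 else y1)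
        (if y1 > y2 then x1 else x2) (if y1 > y2 then y1 else y2)) ↔
    ((px, py) ∈
      (if x2 - x1 = 0 ∨ y2 - y1 = 0 ∨ (x2 - x1).natAbs = (y2 - y1).natAbs then
        (PySem.List.pyRange 0 (max |x2 - x1| |y2 - y1| + 1) 1).map
          (fun k => (x1 + k * ((if x2 - x1 > 0 then 1 else 0) - (if x2 - x1 < 0 then 1 else 0)),
                     y1 + k * ((if y2 - y1 > 0 then 1 else 0) - (if y2 - y1 < 0 then 1 else 0))))
      else [((x2 : Int), (y2 : Int))])) := by
  by_cases hsw : y1 > y2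
  · -- swapped frame: chessPathList (x2,y2) x2 y2 x1 y1, with y2 - y1 < 0
    simp only [hsw, if_true, chessPathList]
    by_cases hx : x2 = x1
    · -- vertical (dx = 0, dy < 0)
      rw [if_neg (show ¬(x1 - x2 = -(y1 - y2)) by omega), if_neg (show ¬(y1 - y2 = x1 - x2) by omega),
        if_neg (show ¬(y2 = y1) by omega), if_pos hx, if_pos (show x2 - x1 = 0 ∨ _ by left; omega),
        show |x2 - x1| = 0 by rw [show x2 - x1 = 0 by omega]; exact abs_zero,
        show |y2 - y1| = y1 - y2 by rw [abs_of_neg (by omega)]; ring]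
      simp only [show ¬(x2 - x1 > 0) from by omega, show ¬(x2 - x1 < 0) from by omega,
        show ¬(y2 - y1 > 0) from by omega, show y2 - y1 < 0 from by omega, if_true, if_false]
      simp only [sub_self, zero_sub, mul_zero, mul_neg_one, add_zero,
      ← sub_eq_add_neg, List.mem_append, List.mem_singleton, Prod.mk.injEq,
      mem_col,
      mem_vert_m]
      omega
    · by_cases hd : y1 - y2 = x1 - x2
      · -- main diagonal, both deltas negative
        rw [if_neg (show ¬(x1 - x2 = -(y1 - y2)) by omega), if_pos hd,
          if_neg (show ¬(y2 = y1) by omega), if_neg hx,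
          if_pos (show x2 - x1 = 0 ∨ y2 - y1 = 0 ∨ (x2 - x1).natAbs = (y2 - y1).natAbs by right; right; omega),
          show |x2 - x1| = x1 - x2 by rw [abs_of_neg (by omega)]; ring,
          show |y2 - y1| = y1 - y2 by rw [abs_of_neg (by omega)]; ring]
        simp only [show ¬(x2 - x1 > 0) from by omega, show x2 - x1 < 0 from by omega,
          show ¬(y2 - y1 > 0) from by omega, show y2 - y1 < 0 from by omega, if_true, if_false]
        simp only [zero_sub, mul_neg_one,
      ← sub_eq_add_neg, List.mem_append, List.mem_singleton, Prod.mk.injEq,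
      mem_seg_pp, mem_seg_mm,
      ]
        omega
      · by_cases ha : x1 - x2 = -(y1 - y2)
        · -- anti-diagonal: dx > 0, dy < 0
          rw [if_pos ha, if_neg hd, if_neg (show ¬(y2 = y1) by omega), if_neg hx,
            if_pos (show x2 - x1 = 0 ∨ y2 - y1 = 0 ∨ (x2 - x1).natAbs = (y2 - y1).natAbs by right; right; omega),
            show |x2 - x1| = x2 - x1 by rw [abs_of_pos (by omega)],
            show |y2 - y1| = y1 - y2 by rw [abs_of_neg (by omega)]; ring]
          simp only [show x2 - x1 > 0 from by omega, show ¬(x2 - x1 < 0) from by omega,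
            show ¬(y2 - y1 > 0) from by omega, show y2 - y1 < 0 from by omega, if_true, if_false]
          simp only [sub_zero, zero_sub, mul_one, mul_neg_one,
      ← sub_eq_add_neg, List.mem_append, List.mem_singleton, Prod.mk.injEq,
      mem_seg_mp, mem_seg_pm,
      ]
          omega
        · -- not aligned
          rw [if_neg ha, if_neg hd, if_neg (show ¬(y2 = y1) by omega), if_neg hx,
            if_neg (show ¬(x2 - x1 = 0 ∨ y2 - y1 = 0 ∨ (x2 - x1).natAbs = (y2 - y1).natAbs) by omega)]
  · -- unswapped frame: chessPathList (x2,y2) x1 y1 x2 y2, with y1 ≤ y2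
    simp only [hsw, if_false, chessPathList]
    by_cases hy : y1 = y2
    · by_cases hx : x1 = x2
      · -- single point
        rw [if_pos (show x2 - x1 = -(y2 - y1) by omega), if_pos (show y2 - y1 = x2 - x1 by omega),
          if_pos hy, if_pos hx, if_pos (show x2 - x1 = 0 ∨ _ by left; omega),
          show |x2 - x1| = 0 by rw [show x2 - x1 = 0 by omega]; exact abs_zero,
          show |y2 - y1| = 0 by rw [show y2 - y1 = 0 by omega]; exact abs_zero]
        simp only [show ¬(x2 - x1 > 0) from by omega, show ¬(x2 - x1 < 0) from by omega,
          show ¬(y2 - y1 > 0) from by omega, show ¬(y2 - y1 < 0) from by omega, if_false]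
        simp only [sub_self, mul_zero, add_zero,
      List.mem_append, List.mem_singleton, Prod.mk.injEq,
      mem_col, mem_row, mem_seg_pp, mem_seg_mp,
      mem_const]
        omega
      · by_cases hxp : x1 < x2
        · -- horizontal, dx > 0
          rw [if_neg (show ¬(x2 - x1 = -(y2 - y1)) by omega), if_neg (show ¬(y2 - y1 = x2 - x1) by omega),
            if_pos hy, if_neg hx, if_pos (show _ ∨ y2 - y1 = 0 ∨ _ by right; left; omega),
            show |x2 - x1| = x2 - x1 by rw [abs_of_pos (by omega)],
            show |y2 - y1| = 0 by rw [show y2 - y1 = 0 by omega]; exact abs_zero]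
          simp only [show x2 - x1 > 0 from by omega, show ¬(x2 - x1 < 0) from by omega,
            show ¬(y2 - y1 > 0) from by omega, show ¬(y2 - y1 < 0) from by omega, if_true, if_false]
          simp only [sub_self, sub_zero, mul_zero, mul_one, add_zero,
      List.mem_append, List.mem_singleton, Prod.mk.injEq,
      mem_row,
      mem_horiz_p]
          omega
        · -- horizontal, dx < 0
          rw [if_neg (show ¬(x2 - x1 = -(y2 - y1)) by omega), if_neg (show ¬(y2 - y1 = x2 - x1) by omega),
            if_pos hy, if_neg hx, if_pos (show _ ∨ y2 - y1 = 0 ∨ _ by right; left; omega),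
            show |x2 - x1| = x1 - x2 by rw [abs_of_neg (by omega)]; ring,
            show |y2 - y1| = 0 by rw [show y2 - y1 = 0 by omega]; exact abs_zero]
          simp only [show ¬(x2 - x1 > 0) from by omega, show x2 - x1 < 0 from by omega,
            show ¬(y2 - y1 > 0) from by omega, show ¬(y2 - y1 < 0) from by omega, if_true, if_false]
          simp only [sub_self, zero_sub, mul_zero, mul_neg_one, add_zero,
      ← sub_eq_add_neg, List.mem_append, List.mem_singleton, Prod.mk.injEq,
      mem_row,
      mem_horiz_m]
          omega
    · -- y1 < y2
      by_cases hx : x1 = x2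
      · -- vertical, dy > 0
        rw [if_neg (show ¬(x2 - x1 = -(y2 - y1)) by omega), if_neg (show ¬(y2 - y1 = x2 - x1) by omega),
          if_neg hy, if_pos hx, if_pos (show x2 - x1 = 0 ∨ _ by left; omega),
          show |x2 - x1| = 0 by rw [show x2 - x1 = 0 by omega]; exact abs_zero,
          show |y2 - y1| = y2 - y1 by rw [abs_of_pos (by omega)]]
        simp only [show ¬(x2 - x1 > 0) from by omega, show ¬(x2 - x1 < 0) from by omega,
          show y2 - y1 > 0 from by omega, show ¬(y2 - y1 < 0) from by omega, if_true, if_false]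
        simp only [sub_self, sub_zero, mul_zero, mul_one, add_zero,
      List.mem_append, List.mem_singleton, Prod.mk.injEq,
      mem_col,
      mem_vert_p]
        omega
      · by_cases hd : y2 - y1 = x2 - x1
        · -- main diagonal, both deltas positive
          rw [if_neg (show ¬(x2 - x1 = -(y2 - y1)) by omega), if_pos hd, if_neg hy, if_neg hx,
            if_pos (show x2 - x1 = 0 ∨ y2 - y1 = 0 ∨ (x2 - x1).natAbs = (y2 - y1).natAbs by right; right; omega),
            show |x2 - x1| = x2 - x1 by rw [abs_of_pos (by omega)],
            show |y2 - y1| = y2 - y1 by rw [abs_of_pos (by omega)]]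
          simp only [show x2 - x1 > 0 from by omega, show ¬(x2 - x1 < 0) from by omega,
            show y2 - y1 > 0 from by omega, show ¬(y2 - y1 < 0) from by omega, if_true, if_false]
          simp only [sub_zero, mul_one,
      List.mem_append, List.mem_singleton, Prod.mk.injEq,
      mem_seg_pp,
      ]
          omega
        · by_cases ha : x2 - x1 = -(y2 - y1)
          · -- anti-diagonal: dx < 0, dy > 0
            rw [if_pos ha, if_neg hd, if_neg hy, if_neg hx,
              if_pos (show x2 - x1 = 0 ∨ y2 - y1 = 0 ∨ (x2 - x1).natAbs = (y2 - y1).natAbs by right; right; omega),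
              show |x2 - x1| = x1 - x2 by rw [abs_of_neg (by omega)]; ring,
              show |y2 - y1| = y2 - y1 by rw [abs_of_pos (by omega)]]
            simp only [show ¬(x2 - x1 > 0) from by omega, show x2 - x1 < 0 from by omega,
              show y2 - y1 > 0 from by omega, show ¬(y2 - y1 < 0) from by omega, if_true, if_false]
            simp only [sub_zero, zero_sub, mul_one, mul_neg_one,
      ← sub_eq_add_neg, List.mem_append, List.mem_singleton, Prod.mk.injEq,
      mem_seg_mp,
      ]
            omega
          · -- not aligned
            rw [if_neg ha, if_neg hd, if_neg hy, if_neg hx,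
              if_neg (show ¬(x2 - x1 = 0 ∨ y2 - y1 = 0 ∨ (x2 - x1).natAbs = (y2 - y1).natAbs) by omega)]

-- ===== VERDICT (by name: the statement is the Claim_ definition above) =====
theorem chess_path_spec : Claim_equal_chess_path := by
  unfold Claim_equal_chess_path
  rintro ⟨x1, y1⟩ ⟨x2, y2⟩ _
  unfold Spec_chess_path chess_path chess_path_alt
  simp only []
  rw [← apply_ite PySem.Set.ofList]
  apply sorted2_eq_of_perm
  refine (List.perm_ext_iff_of_nodup (PySem.Set.nodup_ofList _) (PySem.Set.nodup_ofList _)).mpr ?_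
  rintro ⟨px, py⟩
  rw [PySem.Set.mem_ofList, PySem.Set.mem_ofList]
  have h := mem_lists x1 y1 x2 y2 px py
  by_cases hsw : y1 > y2
  · simp only [hsw, if_pos] at h ⊢
    exact h
  · simp only [hsw, reduceIte] at h ⊢
    exact h
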